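-- pv_equiv track=rewrite | github.com/YegorDB/THPoker | thpoker/hardcore.py | half_nominal_finder
-- ===== SOURCE A (Python) =====
-- def half_nominal_finder(cards, w1, w2):
--     hits = 0
--     for w in (w1, w2):
--         for c in cards:
--             if c // 1000 and c % 1000 // 10 == w:
--                 hits += 1
--                 break
--
--     return hits
-- ===== SOURCE B (Python) =====
-- def half_nominal_finder(cards, w1, w2):
--     f1 = f2 = False
--     for c in cards:
--         if c // 1000:
--             w = c % 1000 // 10
--             f1 = f1 or w == w1
--             f2 = f2 or w == w2
--             if f1 and f2:
--                 break
--     return f1 + f2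
-- ===== Notes on version B (the rewrite author's own statement) =====
-- stated objective: alternative
-- what changed: Replaces A's per-weight rescans of the card list with one fused pass that maintains two found-flags (early break when both are set) and returns their sum.
import Mathlib
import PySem

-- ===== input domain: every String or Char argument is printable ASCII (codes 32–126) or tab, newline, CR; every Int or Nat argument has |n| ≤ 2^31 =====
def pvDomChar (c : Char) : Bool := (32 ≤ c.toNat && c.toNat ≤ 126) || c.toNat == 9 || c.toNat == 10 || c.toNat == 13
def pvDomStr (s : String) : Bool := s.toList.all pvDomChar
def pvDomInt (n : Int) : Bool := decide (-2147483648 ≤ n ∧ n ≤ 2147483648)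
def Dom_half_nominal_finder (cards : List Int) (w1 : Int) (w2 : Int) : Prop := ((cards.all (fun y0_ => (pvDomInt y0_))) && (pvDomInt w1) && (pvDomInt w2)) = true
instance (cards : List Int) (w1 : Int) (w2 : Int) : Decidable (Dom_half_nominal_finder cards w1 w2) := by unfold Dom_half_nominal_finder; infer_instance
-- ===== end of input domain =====

-- B makes a single fused pass over cards with two found-flags (early break when
-- both are set) and returns their sum, instead of A's one scan per queried weight.

-- ===== PORT A =====
-- inner 'for c in cards: if …: hits += 1; break' loop, as a Bool: found-or-not
def pvInnerScan (w : Int) : List Int → Bool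
  | [] => false
  | c :: rest =>
    if PySem.Int.floordiv c 1000 ≠ 0 ∧ PySem.Int.floordiv (PySem.Int.mod c 1000) 10 = w then
      true
    else pvInnerScan w rest

def half_nominal_finder (cards : List Int) (w1 : Int) (w2 : Int) : Int :=
  [w1, w2].foldl (fun hits w => if pvInnerScan w cards then hits + 1 else hits) 0

-- ===== PORT B =====
-- the single fused loop of Source B: two flags, early break when both are true
def pvScan2 (w1 w2 : Int) : List Int → Bool → Bool → Bool × Bool
  | [], f1, f2 => (f1, f2)
  | c :: rest, f1, f2 =>
    if PySem.Int.floordiv c 1000 ≠ 0 then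
      let w := PySem.Int.floordiv (PySem.Int.mod c 1000) 10
      let f1' := f1 || (w == w1)
      let f2' := f2 || (w == w2)
      if f1' && f2' then (f1', f2') else pvScan2 w1 w2 rest f1' f2'
    else pvScan2 w1 w2 rest f1 f2

def half_nominal_finder_alt (cards : List Int) (w1 : Int) (w2 : Int) : Int :=
  let r := pvScan2 w1 w2 cards false false
  (if r.1 then 1 else 0) + (if r.2 then 1 else 0)

-- ===== PRECONDITION & SPEC =====
def Spec_half_nominal_finder (cards : List Int) (w1 : Int) (w2 : Int) (out : Int) : Prop := out = half_nominal_finder_alt cards w1 w2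
instance (cards : List Int) (w1 : Int) (w2 : Int) (out : Int) : Decidable (Spec_half_nominal_finder cards w1 w2 out) := by unfold Spec_half_nominal_finder; infer_instance

-- ===== CLAIM (what is proved, stated in full; the proofs are below) =====
def Claim_equal_half_nominal_finder : Prop := ∀ (cards : List Int) (w1 : Int) (w2 : Int), Dom_half_nominal_finder cards w1 w2 → Spec_half_nominal_finder cards w1 w2 (half_nominal_finder cards w1 w2)

-- ===== LEMMAS AND PROOFS =====
theorem pvScan2_eq (w1 w2 : Int) (cards : List Int) (f1 f2 : Bool) :
    pvScan2 w1 w2 cards f1 f2 = (f1 || pvInnerScan w1 cards, f2 || pvInnerScan w2 cards) := by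
  induction cards generalizing f1 f2 with
  | nil => simp [pvScan2, pvInnerScan]
  | cons c rest ih =>
    have hf : PySem.Int.floordiv c 1000 = c / 1000 :=
      PySem.Int.floordiv_eq_ediv_of_pos (by norm_num)
    have hm : PySem.Int.mod c 1000 = c % 1000 :=
      PySem.Int.mod_eq_emod_of_pos (by norm_num)
    have hf2 : PySem.Int.floordiv (PySem.Int.mod c 1000) 10 = c % 1000 / 10 := by
      rw [hm]; exact PySem.Int.floordiv_eq_ediv_of_pos (by norm_num)
    by_cases h1 : c / 1000 = 0
    · simp [pvScan2, pvInnerScan, hf, h1, ih]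
    · by_cases e1 : c % 1000 / 10 = w1 <;> by_cases e2 : c % 1000 / 10 = w2 <;>
        cases f1 <;> cases f2 <;>
        simp [pvScan2, pvInnerScan, hf, hf2, h1, e1, e2, ih, Bool.or_assoc] <;>
        (try (by_cases ew : w1 = w2 <;> simp [ew])) <;> (try (by_cases ew2 : w2 = w1 <;> simp [ew2]))

-- ===== VERDICT (by name: the statement is the Claim_ definition above) =====
theorem half_nominal_finder_spec : Claim_equal_half_nominal_finder := by
  intro cards w1 w2 _
  unfold Spec_half_nominal_finder half_nominal_finder half_nominal_finder_alt
  rw [pvScan2_eq]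
  simp only [List.foldl, Bool.false_or]
  split_ifs <;> omega
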